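-- pv_equiv track=rewrite | github.com/fareedasaad2710/optimization | simple_robot_coverage.py | divide_cells_equally
-- ===== SOURCE A (Python) =====
-- def divide_cells_equally(total_cells, num_robots):
--     cells_per_robot = total_cells // num_robots
--     remainder = total_cells % num_robots
--
--     assignments = []
--     start_idx = 0
--
--     for robot in range(num_robots):
--         # Some robots get one extra cell if there's a remainder
--         robot_cell_count = cells_per_robot + (1 if robot < remainder else 0)
--         end_idx = start_idx + robot_cell_count
--
--         # Create assignment for this robot
--         robot_assignment = [0] * num_robots
--         robot_assignment[robot] = 1
--
--         # Assign cells to this robot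
--         for cell_idx in range(start_idx, end_idx):
--             if cell_idx < total_cells:
--                 assignments.append(robot_assignment.copy())
--
--         start_idx = end_idx
--
--     return assignments
-- ===== SOURCE B (Python) =====
-- def divide_cells_equally(total_cells, num_robots):
--     if num_robots <= 0 or total_cells <= 0:
--         return []
--     base = total_cells // num_robots
--     remainder = total_cells % num_robots
--     boundary = remainder * (base + 1)
--
--     def owner(i):
--         if i < boundary:
--             return i // (base + 1)
--         return remainder + (i - boundary) // base
--
--     one_hot = []
--     for r in range(num_robots):
--         row = [0] * num_robots
--         row[r] = 1
--         one_hot.append(row)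
--     return [one_hot[owner(i)].copy() for i in range(total_cells)]
-- ===== Notes on version B (the rewrite author's own statement) =====
-- stated objective: alternative
-- what changed: Replaces A's nested robot-then-cell loop carrying a running start index with a single pass over cell indices that computes each cell's owning robot by a closed-form quotient formula and looks up a precomputed one-hot row.
import Mathlib
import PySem

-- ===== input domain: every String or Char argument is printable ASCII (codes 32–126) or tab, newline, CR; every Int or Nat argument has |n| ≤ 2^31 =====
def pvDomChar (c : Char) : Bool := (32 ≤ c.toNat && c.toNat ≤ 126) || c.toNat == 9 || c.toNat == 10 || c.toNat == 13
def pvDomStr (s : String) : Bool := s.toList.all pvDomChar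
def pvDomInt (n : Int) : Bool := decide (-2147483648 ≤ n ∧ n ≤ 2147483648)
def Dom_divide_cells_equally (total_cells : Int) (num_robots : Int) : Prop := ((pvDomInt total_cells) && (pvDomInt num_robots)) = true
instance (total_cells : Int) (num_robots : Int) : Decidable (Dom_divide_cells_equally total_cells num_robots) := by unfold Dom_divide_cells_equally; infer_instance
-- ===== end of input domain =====

-- B replaces A's nested robot-then-cell loop (running start index, row copies) by a single
-- cell-indexed pass computing each cell's owning robot with a closed-form formula (alternative decomposition).


-- ===== PORT A =====
-- robot_assignment = [0]*num_robots; robot_assignment[robot] = 1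
def pvRowA (num_robots robot : Int) : List Int :=
  PySem.List.pySetD (List.replicate num_robots.toNat (0 : Int)) robot 1

-- the body of A's outer 'for robot in range(num_robots)' loop; state = (assignments, start_idx)
def pvStepA (total_cells num_robots cells_per_robot remainder : Int)
    (st : List (List Int) × Int) (robot : Int) : List (List Int) × Int :=
  let robot_cell_count := cells_per_robot + (if robot < remainder then 1 else 0)
  let end_idx := st.2 + robot_cell_count
  let robot_assignment := pvRowA num_robots robot
  ((PySem.List.pyRange st.2 end_idx 1).foldl
      (fun acc cell_idx => if cell_idx < total_cells then acc ++ [robot_assignment] else acc) st.1,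
   end_idx)

def divide_cells_equally (total_cells : Int) (num_robots : Int) : List (List Int) :=
  let cells_per_robot := PySem.Int.floordiv total_cells num_robots
  let remainder := PySem.Int.mod total_cells num_robots
  ((PySem.List.pyRange 0 num_robots 1).foldl
      (pvStepA total_cells num_robots cells_per_robot remainder) ([], 0)).1

-- ===== PORT B =====
def pvOwner (boundary base remainder i : Int) : Int :=
  if i < boundary then PySem.Int.floordiv i (base + 1)
  else remainder + PySem.Int.floordiv (i - boundary) base

-- one_hot built by B's loop: row = [0]*num_robots; row[r] = 1; one_hot.append(row)
def pvOneHot (num_robots : Int) : List (List Int) :=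
  (PySem.List.pyRange 0 num_robots 1).foldl
    (fun acc r => acc ++ [PySem.List.pySetD (List.replicate num_robots.toNat (0 : Int)) r 1]) []

def divide_cells_equally_alt (total_cells : Int) (num_robots : Int) : List (List Int) :=
  if num_robots ≤ 0 ∨ total_cells ≤ 0 then []
  else
    let base := PySem.Int.floordiv total_cells num_robots
    let remainder := PySem.Int.mod total_cells num_robots
    let boundary := remainder * (base + 1)
    (PySem.List.pyRange 0 total_cells 1).map (fun i =>
      PySem.List.pyGetD (pvOneHot num_robots) (pvOwner boundary base remainder i) [])

-- ===== PRECONDITION & SPEC =====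
-- Pre_ excludes only num_robots = 0, where Python A raises ZeroDivisionError.
def Pre_divide_cells_equally (total_cells : Int) (num_robots : Int) : Prop := num_robots ≠ 0
instance (total_cells : Int) (num_robots : Int) : Decidable (Pre_divide_cells_equally total_cells num_robots) := by unfold Pre_divide_cells_equally; infer_instance
def pvWitness_divide_cells_equally : Int × Int := (7, 3)

def Spec_divide_cells_equally (total_cells : Int) (num_robots : Int) (out : List (List Int)) : Prop := out = divide_cells_equally_alt total_cells num_robots
instance (total_cells : Int) (num_robots : Int) (out : List (List Int)) : Decidable (Spec_divide_cells_equally total_cells num_robots out) := by unfold Spec_divide_cells_equally; infer_instance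

-- ===== CLAIM (what is proved, stated in full; the proofs are below) =====
def Claim_equal_divide_cells_equally : Prop := ∀ (total_cells : Int) (num_robots : Int), Dom_divide_cells_equally total_cells num_robots → Pre_divide_cells_equally total_cells num_robots → Spec_divide_cells_equally total_cells num_robots (divide_cells_equally total_cells num_robots)

-- ===== LEMMAS AND PROOFS =====

-- inner cell loop with the guard always true appends one row per index
lemma pv_inner' (t : Int) (row : List Int) :
    ∀ (l : List Int) (acc : List (List Int)), (∀ x ∈ l, x < t) →
      l.foldl (fun acc cell_idx => if cell_idx < t then acc ++ [row] else acc) acc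
      = acc ++ l.map (fun _ => row) := by
  intro l
  induction l with
  | nil => intro acc _; simp
  | cons x xs ih =>
    intro acc h
    simp only [List.foldl_cons, List.map_cons, if_pos (h x (by simp))]
    rw [ih _ (fun y hy => h y (by simp [hy]))]
    simp

lemma pv_inner (t a b : Int) (row : List Int) (hb : b ≤ t) (acc : List (List Int)) :
    (PySem.List.pyRange a b 1).foldl
      (fun acc cell_idx => if cell_idx < t then acc ++ [row] else acc) acc
    = acc ++ (PySem.List.pyRange a b 1).map (fun _ => row) := by
  apply pv_inner'
  intro x hx
  have := (PySem.List.mem_pyRange_one.mp hx).2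
  omega

-- when every robot in the list has a nonpositive cell count the assignments stay unchanged
lemma pv_nilfold (t n q r : Int)
    (l : List Int) (h : ∀ k ∈ l, q + (if k < r then 1 else 0) ≤ 0) :
    ∀ (acc : List (List Int)) (s : Int),
      ((l.foldl (pvStepA t n q r) (acc, s)).1) = acc := by
  induction l with
  | nil => intro acc s; rfl
  | cons x xs ih =>
    intro acc s
    have hx := h x (by simp)
    simp only [List.foldl_cons, pvStepA]
    rw [PySem.List.pyRange_one_eq_nil (by omega)]
    exact ih (fun k hk => h k (by simp [hk])) acc _

-- one_hot[k] equals A's set-based one-hot row, for 0 ≤ k < n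
lemma pv_row (n k : Int) (h0 : 0 ≤ k) (hn : k < n) :
    PySem.List.pyGetD (pvOneHot n) k [] = pvRowA n k := by
  unfold pvOneHot pvRowA
  rw [PySem.List.foldl_append_singleton_eq_map, List.nil_append]
  rw [PySem.List.pyGetD_map_pyRange_of_nonneg _ _ _ _ h0 hn]

-- the closed-form owner is k on [S k, S (k+1)) where S k = k*q + min k r
lemma pv_owner (n q r k i : Int) (hq0 : 0 ≤ q) (hr0 : 0 ≤ r) (hrn : r < n)
    (hk0 : 0 ≤ k) (hkn : k < n)
    (hlo : k * q + min k r ≤ i) (hhi : i < (k + 1) * q + min (k + 1) r) :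
    pvOwner (r * (q + 1)) q r i = k := by
  unfold pvOwner
  rcases lt_or_ge k r with hkr | hkr
  · -- k < r : i ∈ [k(q+1), (k+1)(q+1)), inside the boundary
    have hmin1 : min k r = k := by omega
    have hmin2 : min (k + 1) r = k + 1 := by omega
    rw [hmin1] at hlo; rw [hmin2] at hhi
    have hlo' : k * (q + 1) ≤ i := by linarith
    have hhi' : i < (k + 1) * (q + 1) := by linarith
    have hib : i < r * (q + 1) := by
      have : (k + 1) * (q + 1) ≤ r * (q + 1) :=
        mul_le_mul_of_nonneg_right (by omega) (by omega)
      linarith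
    rw [if_pos hib]
    exact (PySem.Int.floordiv_eq_iff_of_pos (by omega)).mpr ⟨hlo', hhi'⟩
  · -- r ≤ k : i ∈ [kq + r, (k+1)q + r), past the boundary
    have hmin1 : min k r = r := by omega
    have hmin2 : min (k + 1) r = r := by omega
    rw [hmin1] at hlo; rw [hmin2] at hhi
    have hqpos : 0 < q := by nlinarith
    have hib : ¬ i < r * (q + 1) := by
      have : r * q ≤ k * q := mul_le_mul_of_nonneg_right hkr hq0
      have hrq : r * (q + 1) = r * q + r := by ring
      omega
    rw [if_neg hib]
    have : PySem.Int.floordiv (i - r * (q + 1)) q = k - r := by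
      refine (PySem.Int.floordiv_eq_iff_of_pos hqpos).mpr ⟨?_, ?_⟩
      · nlinarith
      · nlinarith
    rw [this]
    omega

-- S k ≤ t for 0 ≤ k ≤ n
lemma pv_S_le (t n q r k : Int) (hq0 : 0 ≤ q) (hr0 : 0 ≤ r)
    (heq : q * n + r = t) (hk0 : 0 ≤ k) (hkn : k ≤ n) :
    k * q + min k r ≤ t := by
  have h1 : 0 ≤ q * (n - k) := mul_nonneg hq0 (by omega)
  have h2 : t - (k * q + min k r) = q * (n - k) + (r - min k r) := by
    rw [← heq]; ring_nf
  omega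

-- main invariant: folding A's step over robots k..n-1 from state (acc, S k)
-- appends exactly B's rows for cells S k .. t-1
lemma pv_main (t n q r : Int) (ht : 0 < t) (hn : 0 < n)
    (hq0 : 0 ≤ q) (hr0 : 0 ≤ r) (hrn : r < n) (heq : q * n + r = t) :
    ∀ (m : Nat) (k : Int), n - k = (m : Int) → 0 ≤ k → ∀ (acc : List (List Int)),
      (((PySem.List.pyRange k n 1).foldl (pvStepA t n q r) (acc, k * q + min k r)).1)
      = acc ++ (PySem.List.pyRange (k * q + min k r) t 1).map
          (fun i => PySem.List.pyGetD (pvOneHot n) (pvOwner (r * (q + 1)) q r i) []) := by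
  intro m
  induction m with
  | zero =>
    intro k hkm hk0 acc
    have hk : k = n := by omega
    rw [hk]
    rw [PySem.List.pyRange_one_eq_nil (le_refl n)]
    have hmin : min n r = r := by omega
    have hS : n * q + min n r = t := by rw [hmin, ← heq]; ring
    rw [hS, PySem.List.pyRange_one_eq_nil (le_refl t)]
    simp
  | succ m ih =>
    intro k hkm hk0 acc
    have hkn : k < n := by omega
    rw [PySem.List.pyRange_one_cons hkn]
    simp only [List.foldl_cons]
    have hstep : k * q + min k r + (q + (if k < r then 1 else 0))
        = (k + 1) * q + min (k + 1) r := by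
      have : (k + 1) * q = k * q + q := by ring
      omega
    have hS1le : (k + 1) * q + min (k + 1) r ≤ t :=
      pv_S_le t n q r (k + 1) hq0 hr0 heq (by omega) (by omega)
    have hSmono : k * q + min k r ≤ (k + 1) * q + min (k + 1) r := by
      have : (k + 1) * q = k * q + q := by ring
      omega
    show (((PySem.List.pyRange (k+1) n 1).foldl (pvStepA t n q r)
        (pvStepA t n q r (acc, k * q + min k r) k)).1) = _
    rw [show pvStepA t n q r (acc, k * q + min k r) k
        = (acc ++ (PySem.List.pyRange (k * q + min k r) ((k + 1) * q + min (k + 1) r) 1).map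
            (fun _ => pvRowA n k),
           (k + 1) * q + min (k + 1) r) from ?_]
    · rw [ih (k + 1) (by omega) (by omega)]
      rw [List.append_assoc]
      congr 1
      rw [PySem.List.pyRange_one_append (k * q + min k r) ((k + 1) * q + min (k + 1) r) t
            hSmono hS1le, List.map_append]
      congr 1
      apply List.map_congr_left
      intro i hi
      have hmem := PySem.List.mem_pyRange_one.mp hi
      rw [pv_owner n q r k i hq0 hr0 hrn hk0 hkn hmem.1 hmem.2]
      exact (pv_row n k hk0 hkn).symm
    · unfold pvStepA
      simp only []
      rw [← hstep, pv_inner t _ _ _ (by omega) acc]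

-- facts about floordiv/mod for a positive divisor
lemma pv_divmod (t n : Int) (hn : 0 < n) :
    PySem.Int.floordiv t n * n + PySem.Int.mod t n = t ∧
    0 ≤ PySem.Int.mod t n ∧ PySem.Int.mod t n < n := by
  refine ⟨PySem.Int.floordiv_mul_add_mod t n, ?_, ?_⟩
  · rw [PySem.Int.mod_eq_emod_of_pos hn]; exact Int.emod_nonneg t (by omega)
  · rw [PySem.Int.mod_eq_emod_of_pos hn]; exact Int.emod_lt_of_pos t hn

-- ===== VERDICT (by name: the statement is the Claim_ definition above) =====
theorem divide_cells_equally_spec : Claim_equal_divide_cells_equally := by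
  unfold Claim_equal_divide_cells_equally
  intro t n _ hpre
  unfold Spec_divide_cells_equally
  unfold Pre_divide_cells_equally at hpre
  rcases lt_trichotomy n 0 with hn | hn | hn
  · -- num_robots < 0: both empty
    unfold divide_cells_equally divide_cells_equally_alt
    rw [PySem.List.pyRange_one_eq_nil (by omega)]
    rw [if_pos (Or.inl (by omega))]
    rfl
  · exact absurd hn hpre
  · obtain ⟨heq, hr0, hrn⟩ := pv_divmod t n hn
    set q := PySem.Int.floordiv t n with hq
    set r := PySem.Int.mod t n with hr
    by_cases ht : t ≤ 0
    · -- total_cells ≤ 0: both empty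
      have hq0 : q ≤ 0 := by nlinarith
      unfold divide_cells_equally divide_cells_equally_alt
      rw [if_pos (Or.inr ht)]
      rw [← hq, ← hr]
      apply pv_nilfold
      intro k hk
      have hk0 := (PySem.List.mem_pyRange_one.mp hk).1
      rcases lt_or_eq_of_le ht with ht' | ht'
      · have : q ≤ -1 := by
          by_contra hcon
          push_neg at hcon
          have : 0 ≤ q * n := mul_nonneg (by omega) (by omega)
          omega
        split_ifs <;> omega
      · have h1 : 0 ≤ q := by
          by_contra hc
          push_neg at hc
          have : q * n ≤ (-1) * n := mul_le_mul_of_nonneg_right (by omega) (by omega)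
          omega
        have h2 : q ≤ 0 := by
          by_contra hc
          push_neg at hc
          have : 1 * n ≤ q * n := mul_le_mul_of_nonneg_right (by omega) (by omega)
          omega
        have hq' : q = 0 := le_antisymm h2 h1
        have hqn : q * n = 0 := by rw [hq']; ring
        have hr' : r = 0 := by omega
        rw [hq', hr']
        simp; omega
    · -- main case: total_cells > 0, num_robots > 0
      have hq0 : 0 ≤ q := by
        by_contra hc
        push_neg at hc
        have : q * n ≤ (-1) * n := mul_le_mul_of_nonneg_right (by omega) (by omega)
        omega
      unfold divide_cells_equally divide_cells_equally_alt
      rw [if_neg (by push_neg; omega)]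
      rw [← hq, ← hr]
      have h0 : (0 : Int) * q + min 0 r = 0 := by omega
      have ht' : 0 < t := by omega
      have := pv_main t n q r ht' hn hq0 hr0 hrn heq n.toNat 0 (by omega) (le_refl 0) []
      rw [h0] at this
      simpa using this
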